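-- pv_equiv track=rewrite | github.com/yaejinpark/python-lc | codewars/python-jin/6kyu/rectangle_to_square_jin.py | sq_in_rect
-- ===== SOURCE A (Python) =====
-- def sq_in_rect(lng, wdth):
--     if lng == wdth: return None
--
--     sizes = []
--     while lng and wdth:
--         new_square_size = min(lng,wdth)
--         sizes.append(new_square_size)
--         if lng == new_square_size:
--             wdth -= new_square_size
--         else:
--             lng -= new_square_size
--     return sizes
-- ===== SOURCE B (Python) =====
-- def _rounds(a, b):
--     # continued-fraction rounds of the rectangle: list of (square size, count)
--     if a == 0 or b == 0:
--         return []
--     if a < b: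
--         q, r = divmod(b, a)
--         return [(a, q)] + _rounds(a, r)
--     else:
--         q, r = divmod(a, b)
--         return [(b, q)] + _rounds(r, b)
--
-- def sq_in_rect(lng, wdth):
--     if lng == wdth:
--         return None
--     return [m for (m, q) in _rounds(lng, wdth) for _ in range(q)]
-- ===== Notes on version B (the rewrite author's own statement) =====
-- stated objective: alternative
-- what changed: Replaces the per-square subtraction while-loop by a recursive Euclidean decomposition: a helper computes the list of (square size, count) rounds via divmod, and the answer is flattened from it with a comprehension.
import Mathlib
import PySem

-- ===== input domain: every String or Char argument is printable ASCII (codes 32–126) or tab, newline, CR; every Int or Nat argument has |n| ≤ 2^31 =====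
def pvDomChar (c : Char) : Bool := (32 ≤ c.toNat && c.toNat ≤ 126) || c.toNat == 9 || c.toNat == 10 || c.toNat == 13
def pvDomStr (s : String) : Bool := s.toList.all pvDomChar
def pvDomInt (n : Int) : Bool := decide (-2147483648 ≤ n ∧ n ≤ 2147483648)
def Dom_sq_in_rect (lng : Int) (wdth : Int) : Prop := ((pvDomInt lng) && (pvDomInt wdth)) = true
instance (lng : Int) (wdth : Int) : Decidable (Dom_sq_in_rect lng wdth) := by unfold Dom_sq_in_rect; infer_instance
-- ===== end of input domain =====

-- B replaces A's per-square subtraction loop by a recursive Euclidean decomposition into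
-- (square size, count) rounds, flattened afterwards.

-- ===== PORT A =====
-- A's while loop, driven by fuel (one unit per Python iteration; (lng+wdth).toNat units
-- suffice since each iteration shrinks lng+wdth by at least 1).  The guard `0 < lng ∧ 0 < wdth`
-- coincides with Python's `lng and wdth` on every state reached from an input in Pre_
-- (nonnegative sides); on the other inputs the Python loop never terminates (excluded by Pre_).
def sq_in_rect_loop (fuel : Nat) (lng : Int) (wdth : Int) (sizes : List Int) : List Int :=
  match fuel with
  | 0 => sizes
  | fuel + 1 =>
    if 0 < lng ∧ 0 < wdth then
      let new_square_size := min lng wdth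
      if lng = new_square_size then
        sq_in_rect_loop fuel lng (wdth - new_square_size) (sizes ++ [new_square_size])
      else
        sq_in_rect_loop fuel (lng - new_square_size) wdth (sizes ++ [new_square_size])
    else sizes

def sq_in_rect (lng : Int) (wdth : Int) : Option (List Int) :=
  if lng = wdth then none
  else some (sq_in_rect_loop (lng + wdth).toNat lng wdth [])

-- ===== PORT B =====
-- B's recursive helper `_rounds`, driven by fuel (one unit per recursive call; on Pre_ inputs
-- each call strictly shrinks a + b, so (a + b).toNat units suffice).
def sq_in_rect_rounds (fuel : Nat) (a : Int) (b : Int) : List (Int × Int) :=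
  match fuel with
  | 0 => []
  | fuel + 1 =>
    if a = 0 ∨ b = 0 then []
    else if a < b then
      (a, PySem.Int.floordiv b a) :: sq_in_rect_rounds fuel a (PySem.Int.mod b a)
    else
      (b, PySem.Int.floordiv a b) :: sq_in_rect_rounds fuel (PySem.Int.mod a b) b

-- the comprehension [m for (m, q) in rounds for _ in range(q)]
def sq_in_rect_alt (lng : Int) (wdth : Int) : Option (List Int) :=
  if lng = wdth then none
  else some ((sq_in_rect_rounds (lng + wdth).toNat lng wdth).flatMap
               (fun p => List.replicate p.2.toNat p.1))

-- ===== PRECONDITION & SPEC =====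
-- Pre_ excludes exactly the inputs on which A's while loop never terminates (two unequal
-- nonzero sides not both positive make a side grow or stall forever); A returns on all others.
def Pre_sq_in_rect (lng : Int) (wdth : Int) : Prop :=
  lng = wdth ∨ lng = 0 ∨ wdth = 0 ∨ (0 < lng ∧ 0 < wdth)
instance (lng : Int) (wdth : Int) : Decidable (Pre_sq_in_rect lng wdth) := by
  unfold Pre_sq_in_rect; infer_instance

def pvWitness_sq_in_rect : Int × Int := (6, 4)

def Spec_sq_in_rect (lng : Int) (wdth : Int) (out : Option (List Int)) : Prop := out = sq_in_rect_alt lng wdth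
instance (lng : Int) (wdth : Int) (out : Option (List Int)) : Decidable (Spec_sq_in_rect lng wdth out) := by unfold Spec_sq_in_rect; infer_instance

-- ===== CLAIM =====
def Claim_equal_sq_in_rect : Prop := ∀ (lng : Int) (wdth : Int), Dom_sq_in_rect lng wdth → Pre_sq_in_rect lng wdth → Spec_sq_in_rect lng wdth (sq_in_rect lng wdth)

-- ===== LEMMAS AND PROOFS =====

lemma aLoop_stop (fuel : Nat) (a b : Int) (acc : List Int) (h : ¬ (0 < a ∧ 0 < b)) :
    sq_in_rect_loop fuel a b acc = acc := by
  cases fuel <;> simp [sq_in_rect_loop, h]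

lemma rounds_stop (fuel : Nat) (a b : Int) (h : a = 0 ∨ b = 0) :
    sq_in_rect_rounds fuel a b = [] := by
  cases fuel <;> simp [sq_in_rect_rounds, h]

-- q subtraction steps of A with lng = a ≤ wdth = a*q + r collapse to one batch of q squares
lemma aLoop_left (a : Int) (ha : 0 < a) :
    ∀ (q : Nat) (fuel : Nat) (r : Int) (acc : List Int), 0 ≤ r → r < a → q ≤ fuel →
      sq_in_rect_loop fuel a (a * q + r) acc
        = sq_in_rect_loop (fuel - q) a r (acc ++ List.replicate q a) := by
  intro q
  induction q with
  | zero => intro fuel r acc _ _ _; simp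
  | succ n ih =>
      intro fuel r acc hr0 hra hf
      obtain ⟨f, rfl⟩ : ∃ f, fuel = f + 1 := ⟨fuel - 1, by omega⟩
      have hn : 0 ≤ a * (n : Int) := mul_nonneg ha.le (by positivity)
      have hb : 0 < a * ((n : Int) + 1) + r := by nlinarith
      rw [sq_in_rect_loop]
      have hmin : min a (a * ((n : Nat) + 1 : Nat) + r) = a := by
        push_cast; rw [min_eq_left]; nlinarith
      rw [if_pos ⟨ha, by push_cast; exact hb⟩]
      simp only [hmin, if_true]
      have harg : a * ((n : Nat) + 1 : Nat) + r - a = a * n + r := by push_cast; ring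
      rw [harg, ih f r (acc ++ [a]) hr0 hra (by omega)]
      have hfe : f - n = f + 1 - (n + 1) := by omega
      rw [hfe]
      congr 1
      simp [List.replicate_succ]

-- symmetric: lng = a*q + r ≥ wdth = a
lemma aLoop_right (a : Int) (ha : 0 < a) :
    ∀ (q : Nat) (fuel : Nat) (r : Int) (acc : List Int), 0 ≤ r → r < a → q ≤ fuel →
      sq_in_rect_loop fuel (a * q + r) a acc
        = sq_in_rect_loop (fuel - q) r a (acc ++ List.replicate q a) := by
  intro q
  induction q with
  | zero => intro fuel r acc _ _ _; simp
  | succ n ih =>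
      intro fuel r acc hr0 hra hf
      obtain ⟨f, rfl⟩ : ∃ f, fuel = f + 1 := ⟨fuel - 1, by omega⟩
      have hn : 0 ≤ a * (n : Int) := mul_nonneg ha.le (by positivity)
      have hb : 0 < a * ((n : Int) + 1) + r := by nlinarith
      rw [sq_in_rect_loop]
      have hmin : min (a * ((n : Nat) + 1 : Nat) + r) a = a := by
        push_cast; rw [min_eq_right]; nlinarith
      rw [if_pos ⟨by push_cast; exact hb, ha⟩]
      simp only [hmin]
      by_cases hc : a * (n : Int) + r = 0
      · -- tie: the last square equals both sides; A zeroes wdth, ending with the same list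
        have hn0 : (n : Int) = 0 ∧ r = 0 := by
          constructor
          · have := mul_eq_zero.mp (by omega : a * (n : Int) = 0)
            omega
          · omega
        have hlng : a * ((n : Nat) + 1 : Nat) + r = a := by push_cast; rw [hn0.1, hn0.2]; ring
        rw [if_pos hlng]
        rw [hlng, aLoop_stop _ _ _ _ (by omega)]
        rw [hn0.2, aLoop_stop _ _ _ _ (by omega)]
        have : (n : Nat) = 0 := by exact_mod_cast hn0.1
        simp [this]
      · have hne : a * ((n : Nat) + 1 : Nat) + r ≠ a := by
          push_cast; intro h; apply hc; linarith [h]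
        rw [if_neg hne]
        have harg : a * ((n : Nat) + 1 : Nat) + r - a = a * n + r := by push_cast; ring
        rw [harg, ih f r (acc ++ [a]) hr0 hra (by omega)]
        have hfe : f - n = f + 1 - (n + 1) := by omega
        rw [hfe]
        congr 1
        simp [List.replicate_succ]

-- A's loop from (a, b) produces acc ++ the flattening of B's rounds
lemma loop_eq_rounds : ∀ (n : Nat) (a b : Int) (acc : List Int) (fA fB : Nat),
    (a + b).toNat ≤ n → 0 ≤ a → 0 ≤ b → (a + b).toNat ≤ fA → (a + b).toNat ≤ fB →
    sq_in_rect_loop fA a b acc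
      = acc ++ (sq_in_rect_rounds fB a b).flatMap (fun p => List.replicate p.2.toNat p.1) := by
  intro n
  induction n with
  | zero =>
      intro a b acc fA fB hn ha hb _ _
      rw [aLoop_stop _ _ _ _ (by omega), rounds_stop _ _ _ (by omega)]
      simp
  | succ n ih =>
      intro a b acc fA fB hn ha hb hfA hfB
      by_cases hg : 0 < a ∧ 0 < b
      · obtain ⟨fB', rfl⟩ : ∃ f, fB = f + 1 := ⟨fB - 1, by omega⟩
        rw [sq_in_rect_rounds, if_neg (by omega)]
        by_cases hlt : a < b
        · rw [if_pos hlt]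
          set q := PySem.Int.floordiv b a with hqdef
          set r := PySem.Int.mod b a with hrdef
          have hr0 : 0 ≤ r := PySem.Int.mod_nonneg _ hg.1
          have hra : r < a := PySem.Int.mod_lt _ hg.1
          have hid : q * a + r = b := PySem.Int.floordiv_mul_add_mod b a
          have hq0 : 0 ≤ q := by nlinarith
          have hqcast : ((q.toNat : Int)) = q := Int.toNat_of_nonneg hq0
          have hqqm : q ≤ q * a := le_mul_of_one_le_right hq0 (by omega)
          have hsum : b = a * (q.toNat : Int) + r := by rw [hqcast, mul_comm]; omega
          rw [show sq_in_rect_loop fA a b acc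
                = sq_in_rect_loop fA a (a * (q.toNat : Int) + r) acc by rw [← hsum]]
          rw [aLoop_left a hg.1 q.toNat fA r acc hr0 hra (by omega)]
          rw [ih a r (acc ++ List.replicate q.toNat a) (fA - q.toNat) fB'
                (by omega) ha hr0 (by omega) (by omega)]
          simp [List.flatMap_cons, List.append_assoc]
        · rw [if_neg hlt]
          set q := PySem.Int.floordiv a b with hqdef
          set r := PySem.Int.mod a b with hrdef
          have hr0 : 0 ≤ r := PySem.Int.mod_nonneg _ hg.2
          have hrb : r < b := PySem.Int.mod_lt _ hg.2
          have hid : q * b + r = a := PySem.Int.floordiv_mul_add_mod a b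
          have hq0 : 0 ≤ q := by nlinarith
          have hqcast : ((q.toNat : Int)) = q := Int.toNat_of_nonneg hq0
          have hqqm : q ≤ q * b := le_mul_of_one_le_right hq0 (by omega)
          have hq1 : 1 ≤ q := by nlinarith [PySem.Int.floordiv_mul_add_mod a b]
          have hsum : a = b * (q.toNat : Int) + r := by rw [hqcast, mul_comm]; omega
          rw [show sq_in_rect_loop fA a b acc
                = sq_in_rect_loop fA (b * (q.toNat : Int) + r) b acc by rw [← hsum]]
          rw [aLoop_right b hg.2 q.toNat fA r acc hr0 hrb (by omega)]
          rw [ih r b (acc ++ List.replicate q.toNat b) (fA - q.toNat) fB'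
                (by omega) hr0 hb (by omega) (by omega)]
          simp [List.flatMap_cons, List.append_assoc]
      · rw [aLoop_stop _ _ _ _ hg, rounds_stop _ _ _ (by omega)]
        simp

-- ===== VERDICT =====
theorem sq_in_rect_spec : Claim_equal_sq_in_rect := by
  intro lng wdth _ hpre
  unfold Spec_sq_in_rect sq_in_rect sq_in_rect_alt
  by_cases heq : lng = wdth
  · simp [heq]
  · rw [if_neg heq, if_neg heq]
    rcases hpre with h | h | h | h
    · exact absurd h heq
    · rw [aLoop_stop _ _ _ _ (by omega), rounds_stop _ _ _ (by omega)]; simp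
    · rw [aLoop_stop _ _ _ _ (by omega), rounds_stop _ _ _ (by omega)]; simp
    · exact congrArg some
        (loop_eq_rounds (lng + wdth).toNat lng wdth [] _ _ le_rfl (by omega) (by omega) le_rfl le_rfl)
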